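-- pv_equiv track=rewrite | github.com/Liu-rj/CS309_OOAD_Pac_Man | pacman_server/pacman_server.py | check_whether_can_run
-- ===== SOURCE A (Python) =====
-- def check_whether_can_run(color, board, strong):
--     l1 = len(board)
--     l2 = len(board[0])
--     position = (-1, -1)
--     for i in range(len(board)):
--         for j in range(len(board[0])):
--             if board[i][j] == color:
--                 position = (i, j)
--     next_position = []
--     i = position[0]
--     j = position[1]
--     if (
--             (board[i - 1][j] == 0 or board[i - 1][j] == 3 or board[i - 1][j] == 2 or (
--                     strong and board[i - 1][j] >= 4 and board[i - 1][j] <= 7))):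
--         next_position.append(((i - 1 + l1) % l1, j))
--     ii = (i + 1) % l1
--     if ((board[ii][j] == 0 or board[ii][j] == 3 or board[ii][j] == 2 or (
--             strong and board[ii][j] >= 4 and board[ii][j] <= 7))):
--         next_position.append((ii, j))
--     if (
--             (board[i][j - 1] == 0 or board[i][j - 1] == 3 or board[i][j - 1] == 2 or (
--                     strong and board[i][j - 1] >= 4 and board[i][j - 1] <= 7))):
--         next_position.append((i, (j - 1 + l2) % l2))
--     jj = (j + 1) % l2
--     if ((board[i][jj] == 0 or board[i][jj] == 3 or board[i][jj] == 2 or (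
--             strong and board[i][jj] >= 4 and board[i][jj] <= 7))):
--         next_position.append((i, jj))
--     return position, next_position
-- ===== SOURCE B (Python) =====
-- def check_whether_can_run(color, board, strong):
--     l1 = len(board)
--     l2 = len(board[0])
--     # position: last row-major occurrence, found by one reverse .index on the
--     # flattened board and recovered with divmod
--     flat = [cell for row in board for cell in row]
--     if color in flat:
--         k = len(flat) - 1 - flat[::-1].index(color)
--         position = divmod(k, l2)
--     else:
--         position = (-1, -1)
--     i, j = position
--     # precomputed move table (coordinate to append, cell to test), then one filter
--     moves = [(((i - 1) % l1, j), board[(i - 1) % l1][j % l2]),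
--              (((i + 1) % l1, j), board[(i + 1) % l1][j % l2]),
--              ((i, (j - 1) % l2), board[i % l1][(j - 1) % l2]),
--              ((i, (j + 1) % l2), board[i % l1][(j + 1) % l2])]
--     next_position = [p for p, cell in moves
--                      if cell in (0, 2, 3) or (strong and 4 <= cell <= 7)]
--     return position, next_position
-- ===== Notes on version B (the rewrite author's own statement) =====
-- stated objective: alternative
-- what changed: B locates the colour by flattening the board once and taking a single reverse .index on the flat list, recovering (i, j) with divmod, instead of A's nested row/column scan; the four neighbour tests become a precomputed move table (coordinate, cell) filtered by one comprehension instead of A's chain of four if/append blocks.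
-- outside the precondition, e.g. on check_whether_can_run(1, [[9], [1, 0]], False): A returns ((1, 0), [(1, 0)]), B returns ((1, 0), []); on check_whether_can_run(5, [[1, 2]], False): A raises IndexError, B returns ((-1, -1), [(0, -1), (0, -1)])
import Mathlib
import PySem

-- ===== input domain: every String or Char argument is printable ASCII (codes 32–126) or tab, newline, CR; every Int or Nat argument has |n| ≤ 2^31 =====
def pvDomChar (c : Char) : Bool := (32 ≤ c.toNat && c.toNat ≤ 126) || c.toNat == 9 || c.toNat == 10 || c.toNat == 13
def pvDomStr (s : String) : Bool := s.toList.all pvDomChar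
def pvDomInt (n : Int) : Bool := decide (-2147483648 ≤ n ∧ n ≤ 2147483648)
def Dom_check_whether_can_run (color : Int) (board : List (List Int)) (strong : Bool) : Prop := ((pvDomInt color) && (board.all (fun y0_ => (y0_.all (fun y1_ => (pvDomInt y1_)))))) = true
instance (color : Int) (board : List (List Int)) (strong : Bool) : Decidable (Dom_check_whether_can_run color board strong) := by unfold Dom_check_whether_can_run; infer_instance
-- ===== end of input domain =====

-- B replaces A's nested row/column scan by one reverse .index on the flattened board plus divmod,
-- and A's four unrolled neighbour blocks by a precomputed move table filtered once
-- (objective: alternative, same cost).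

-- ===== PORT A =====
-- board[r][c] with Python indexing (defaults only reachable outside Pre_)
def aCell (board : List (List Int)) (r c : Int) : Int :=
  PySem.List.pyGetD (PySem.List.pyGetD board r []) c 0

-- the repeated passability condition of A, in A's order of tests
def aPass (board : List (List Int)) (r c : Int) (strong : Bool) : Bool :=
  aCell board r c == 0 || aCell board r c == 3 || aCell board r c == 2 ||
    (strong && decide (4 ≤ aCell board r c) && decide (aCell board r c ≤ 7))

def check_whether_can_run (color : Int) (board : List (List Int)) (strong : Bool) :
    (Int × Int) × (List (Int × Int)) :=
  let l1 : Int := (board.length : Int)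
  let l2 : Int := ((PySem.List.pyGetD board 0 []).length : Int)
  let position : Int × Int :=
    (PySem.List.pyRange 0 l1 1).foldl (fun pos i =>
      (PySem.List.pyRange 0 l2 1).foldl (fun pos j =>
        if aCell board i j = color then (i, j) else pos) pos) (-1, -1)
  let i := position.1
  let j := position.2
  let next0 : List (Int × Int) := []
  let next1 := if aPass board (i - 1) j strong then next0 ++ [(PySem.Int.mod (i - 1 + l1) l1, j)] else next0
  let ii := PySem.Int.mod (i + 1) l1
  let next2 := if aPass board ii j strong then next1 ++ [(ii, j)] else next1
  let next3 := if aPass board i (j - 1) strong then next2 ++ [(i, PySem.Int.mod (j - 1 + l2) l2)] else next2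
  let jj := PySem.Int.mod (j + 1) l2
  let next4 := if aPass board i jj strong then next3 ++ [(i, jj)] else next3
  (position, next4)

-- ===== PORT B =====
-- the passability test of Source B's comprehension
def bPassable (cell : Int) (strong : Bool) : Bool :=
  cell == 0 || cell == 2 || cell == 3 || (strong && decide (4 ≤ cell) && decide (cell ≤ 7))

def bCell (board : List (List Int)) (r c : Int) : Int :=
  PySem.List.pyGetD (PySem.List.pyGetD board r []) c 0

def check_whether_can_run_alt (color : Int) (board : List (List Int)) (strong : Bool) :
    (Int × Int) × (List (Int × Int)) :=
  let l1 : Int := (board.length : Int)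
  let l2 : Int := ((PySem.List.pyGetD board 0 []).length : Int)
  -- flat = [cell for row in board for cell in row]
  let flat : List Int := board.flatMap id
  let position : Int × Int :=
    if flat.contains color then
      -- .index cannot raise here: it is guarded by the membership test (getD 0 unreachable)
      let k : Int := (flat.length : Int) - 1 -
        (((PySem.List.index? flat.reverse color).getD 0 : Nat) : Int)
      (PySem.Int.floordiv k l2, PySem.Int.mod k l2)
    else (-1, -1)
  let i := position.1
  let j := position.2
  let moves : List ((Int × Int) × Int) :=
    [((PySem.Int.mod (i - 1) l1, j), bCell board (PySem.Int.mod (i - 1) l1) (PySem.Int.mod j l2)),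
     ((PySem.Int.mod (i + 1) l1, j), bCell board (PySem.Int.mod (i + 1) l1) (PySem.Int.mod j l2)),
     ((i, PySem.Int.mod (j - 1) l2), bCell board (PySem.Int.mod i l1) (PySem.Int.mod (j - 1) l2)),
     ((i, PySem.Int.mod (j + 1) l2), bCell board (PySem.Int.mod i l1) (PySem.Int.mod (j + 1) l2))]
  let next := (moves.filter (fun pc => bPassable pc.2 strong)).map Prod.fst
  (position, next)

-- ===== PRECONDITION & SPEC =====
-- Pre_ excludes the inputs where A raises IndexError (empty board, a row shorter than row 0,
-- or colour absent on a board with fewer than 2 rows or 2 columns) and, in addition, ragged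
-- boards with rows LONGER than row 0: the game board is rectangular by construction, and on a
-- ragged board A's wraparound column index -1 can reach cells outside the l2-column grid that
-- its own scan never visits, so neither value there is specified.
def Pre_check_whether_can_run (color : Int) (board : List (List Int)) (strong : Bool) : Prop :=
  board ≠ [] ∧
  (∀ row ∈ board, row.length = (PySem.List.pyGetD board 0 []).length) ∧
  1 ≤ (PySem.List.pyGetD board 0 []).length ∧
  ((∃ row ∈ board, color ∈ row) ∨ (2 ≤ board.length ∧ 2 ≤ (PySem.List.pyGetD board 0 []).length))
instance (color : Int) (board : List (List Int)) (strong : Bool) : Decidable (Pre_check_whether_can_run color board strong) := by unfold Pre_check_whether_can_run; infer_instance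

def pvWitness_check_whether_can_run : Int × List (List Int) × Bool := (5, [[5, 0], [1, 1]], false)

def Spec_check_whether_can_run (color : Int) (board : List (List Int)) (strong : Bool) (out : (Int × Int) × (List (Int × Int))) : Prop := out = check_whether_can_run_alt color board strong
instance (color : Int) (board : List (List Int)) (strong : Bool) (out : (Int × Int) × (List (Int × Int))) : Decidable (Spec_check_whether_can_run color board strong out) := by unfold Spec_check_whether_can_run; infer_instance

-- ===== CLAIM (what is proved, stated in full; the proofs are below) =====
def Claim_equal_check_whether_can_run : Prop := ∀ (color : Int) (board : List (List Int)) (strong : Bool), Dom_check_whether_can_run color board strong → Pre_check_whether_can_run color board strong → Spec_check_whether_can_run color board strong (check_whether_can_run color board strong)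

-- ===== LEMMAS AND PROOFS =====

-- proof-side description of a reverse scan with break: first j in js with row[j] == color
def bFindRow (color : Int) (row : List Int) : List Int → Option Int
  | [] => none
  | j :: js => if PySem.List.pyGetD row j 0 = color then some j else bFindRow color row js

-- outer reverse scan with break
def bFindPos (color : Int) (board : List (List Int)) (l2 : Int) : List Int → Option (Int × Int)
  | [] => none
  | i :: is' =>
    match bFindRow color (PySem.List.pyGetD board i []) (PySem.List.pyRange (l2 - 1) (-1) (-1)) with
    | some j => some (i, j)
    | none => bFindPos color board l2 is'

lemma foldl_ite_eq_findRev {α β : Type} (q : α → Prop) [DecidablePred q] (g : α → β) :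
    ∀ (js : List α) (init : β),
      js.foldl (fun acc x => if q x then g x else acc) init =
        (match js.reverse.find? (fun x => decide (q x)) with | some x => g x | none => init) := by
  intro js
  induction js with
  | nil => intro init; rfl
  | cons x xs ih =>
    intro init
    simp only [List.foldl_cons, ih, List.reverse_cons, List.find?_append]
    cases h : xs.reverse.find? (fun x => decide (q x)) with
    | some y => simp
    | none => by_cases hq : q x <;> simp [hq, List.find?]

lemma foldl_match_eq_findSomeRev {α β : Type} (h : α → Option β) :
    ∀ (js : List α) (init : β),
      js.foldl (fun acc x => (h x).getD acc) init =
        (js.reverse.findSome? h).getD init := by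
  intro js
  induction js with
  | nil => intro init; rfl
  | cons x xs ih =>
    intro init
    simp only [List.foldl_cons, ih, List.reverse_cons, List.findSome?_append]
    cases hx : h x <;> cases hs : xs.reverse.findSome? h <;> simp [hx, List.findSome?]

lemma bFindRow_eq_find? (color : Int) (row : List Int) (js : List Int) :
    bFindRow color row js = js.find? (fun j => PySem.List.pyGetD row j 0 == color) := by
  induction js with
  | nil => rfl
  | cons j js ih => by_cases h : PySem.List.pyGetD row j 0 = color <;> simp [bFindRow, ih, h, beq_iff_eq]

lemma bFindPos_eq_findSome? (color : Int) (board : List (List Int)) (l2 : Int) (is' : List Int) :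
    bFindPos color board l2 is' =
      is'.findSome? (fun i =>
        (bFindRow color (PySem.List.pyGetD board i []) (PySem.List.pyRange (l2 - 1) (-1) (-1))).map
          (fun j => (i, j))) := by
  induction is' with
  | nil => rfl
  | cons i is'' ih =>
    cases h : bFindRow color (PySem.List.pyGetD board i []) (PySem.List.pyRange (l2 - 1) (-1) (-1)) <;>
      simp [bFindPos, h, ih, List.findSome?]

lemma rev_range (n : Int) : PySem.List.pyRange (n - 1) (-1) (-1) = (PySem.List.pyRange 0 n 1).reverse := by
  simpa using PySem.List.pyRange_neg_one_eq_reverse (n - 1) (-1)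

-- A's nested last-occurrence fold equals the reverse scan with break
lemma pos_eq (color : Int) (board : List (List Int)) :
    (PySem.List.pyRange 0 (board.length : Int) 1).foldl (fun pos i =>
        (PySem.List.pyRange 0 ((PySem.List.pyGetD board 0 []).length : Int) 1).foldl (fun pos j =>
          if aCell board i j = color then (i, j) else pos) pos) (-1, -1) =
      (bFindPos color board ((PySem.List.pyGetD board 0 []).length : Int)
          (PySem.List.pyRange ((board.length : Int) - 1) (-1) (-1))).getD (-1, -1) := by
  set l2 : Int := ((PySem.List.pyGetD board 0 []).length : Int) with hl2
  have hinner : ∀ (i : Int) (pos : Int × Int),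
      (PySem.List.pyRange 0 l2 1).foldl (fun pos j =>
        if aCell board i j = color then (i, j) else pos) pos =
      match (bFindRow color (PySem.List.pyGetD board i []) (PySem.List.pyRange (l2 - 1) (-1) (-1))) with | some j => (i, j) | none => pos := by
    intro i pos
    rw [foldl_ite_eq_findRev (fun j => aCell board i j = color) (fun j => ((i, j) : Int × Int))]
    simp only [bFindRow_eq_find?, rev_range]
    have hpred : (fun x => decide (aCell board i x = color)) =
        (fun j => PySem.List.pyGetD (PySem.List.pyGetD board i []) j 0 == color) := by
      funext j; simp only [aCell]; exact Eq.symm (Bool.beq_eq_decide_eq _ _)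
    rw [hpred]
    cases hf : List.find? (fun j => PySem.List.pyGetD (PySem.List.pyGetD board i []) j 0 == color)
        (PySem.List.pyRange 0 l2 1).reverse <;> simp
  have houter : (fun (pos : Int × Int) (i : Int) =>
      (PySem.List.pyRange 0 l2 1).foldl (fun pos j =>
        if aCell board i j = color then (i, j) else pos) pos) =
      (fun (pos : Int × Int) (i : Int) =>
        (((bFindRow color (PySem.List.pyGetD board i []) (PySem.List.pyRange (l2 - 1) (-1) (-1))).map (fun j => ((i, j) : Int × Int))).getD pos)) := by
    funext pos i
    rw [hinner]
    cases hr : bFindRow color (PySem.List.pyGetD board i []) (PySem.List.pyRange (l2 - 1) (-1) (-1)) <;> simp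
  rw [houter, bFindPos_eq_findSome? color board l2
        (PySem.List.pyRange ((board.length : Int) - 1) (-1) (-1)),
      rev_range (board.length : Int)]
  exact foldl_match_eq_findSomeRev (fun i => ((bFindRow color (PySem.List.pyGetD board i []) (PySem.List.pyRange (l2 - 1) (-1) (-1)))).map (fun j => ((i, j) : Int × Int))) _ _

-- ---- structural facts about the reverse scans ----

lemma bFindRow_some (color : Int) (row : List Int) (js : List Int) (j : Int)
    (h : bFindRow color row js = some j) : j ∈ js ∧ PySem.List.pyGetD row j 0 = color := by
  induction js with
  | nil => simp [bFindRow] at h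
  | cons x xs ih =>
    by_cases hx : PySem.List.pyGetD row x 0 = color
    · simp [bFindRow, hx] at h
      subst h
      exact ⟨List.mem_cons_self, hx⟩
    · simp [bFindRow, hx] at h
      obtain ⟨h1, h2⟩ := ih h
      exact ⟨List.mem_cons_of_mem _ h1, h2⟩

lemma bFindPos_some (color : Int) (board : List (List Int)) (l2 : Int) (is' : List Int) (i j : Int)
    (h : bFindPos color board l2 is' = some (i, j)) :
    i ∈ is' ∧ bFindRow color (PySem.List.pyGetD board i []) (PySem.List.pyRange (l2 - 1) (-1) (-1)) = some j := by
  induction is' with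
  | nil => simp [bFindPos] at h
  | cons x xs ih =>
    cases hx : bFindRow color (PySem.List.pyGetD board x []) (PySem.List.pyRange (l2 - 1) (-1) (-1)) with
    | some y =>
      simp [bFindPos, hx] at h
      obtain ⟨h1, h2⟩ := h
      subst h1; subst h2
      exact ⟨List.mem_cons_self, hx⟩
    | none =>
      simp [bFindPos, hx] at h
      obtain ⟨h1, h2⟩ := ih h
      exact ⟨List.mem_cons_of_mem _ h1, h2⟩

lemma bFindPos_none (color : Int) (board : List (List Int)) (l2 : Int) (is' : List Int) (i : Int)
    (h : bFindPos color board l2 is' = none) (hi : i ∈ is') :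
    bFindRow color (PySem.List.pyGetD board i []) (PySem.List.pyRange (l2 - 1) (-1) (-1)) = none := by
  induction is' with
  | nil => simp at hi
  | cons x xs ih =>
    cases hx : bFindRow color (PySem.List.pyGetD board x []) (PySem.List.pyRange (l2 - 1) (-1) (-1)) with
    | some y => simp [bFindPos, hx] at h
    | none =>
      simp [bFindPos, hx] at h
      rcases List.mem_cons.mp hi with rfl | hmem
      · exact hx
      · exact ih h hmem

lemma bFindRow_none (color : Int) (row : List Int) (js : List Int) (j : Int)
    (h : bFindRow color row js = none) (hj : j ∈ js) : PySem.List.pyGetD row j 0 ≠ color := by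
  induction js with
  | nil => simp at hj
  | cons x xs ih =>
    by_cases hx : PySem.List.pyGetD row x 0 = color
    · simp [bFindRow, hx] at h
    · simp [bFindRow, hx] at h
      rcases List.mem_cons.mp hj with rfl | hmem
      · exact hx
      · exact ih h hmem

-- the break decompositions: everything scanned before the hit was not a hit
lemma bFindRow_some_strong (color : Int) (row : List Int) (js : List Int) (j : Int)
    (h : bFindRow color row js = some j) :
    ∃ pre suf, js = pre ++ j :: suf ∧ (∀ x ∈ pre, PySem.List.pyGetD row x 0 ≠ color) ∧
      PySem.List.pyGetD row j 0 = color := by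
  induction js with
  | nil => simp [bFindRow] at h
  | cons x xs ih =>
    by_cases hx : PySem.List.pyGetD row x 0 = color
    · simp [bFindRow, hx] at h
      subst h
      exact ⟨[], xs, rfl, by simp, hx⟩
    · simp [bFindRow, hx] at h
      obtain ⟨pre, suf, h1, h2, h3⟩ := ih h
      refine ⟨x :: pre, suf, by simp [h1], ?_, h3⟩
      intro y hy
      rcases List.mem_cons.mp hy with rfl | hmem
      · exact hx
      · exact h2 y hmem

lemma bFindPos_some_strong (color : Int) (board : List (List Int)) (l2 : Int) (is' : List Int) (i j : Int)
    (h : bFindPos color board l2 is' = some (i, j)) :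
    ∃ pre suf, is' = pre ++ i :: suf ∧
      (∀ x ∈ pre, bFindRow color (PySem.List.pyGetD board x []) (PySem.List.pyRange (l2 - 1) (-1) (-1)) = none) ∧
      bFindRow color (PySem.List.pyGetD board i []) (PySem.List.pyRange (l2 - 1) (-1) (-1)) = some j := by
  induction is' with
  | nil => simp [bFindPos] at h
  | cons x xs ih =>
    cases hx : bFindRow color (PySem.List.pyGetD board x []) (PySem.List.pyRange (l2 - 1) (-1) (-1)) with
    | some y =>
      simp [bFindPos, hx] at h
      obtain ⟨h1, h2⟩ := h
      subst h1; subst h2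
      exact ⟨[], xs, rfl, by simp, hx⟩
    | none =>
      simp [bFindPos, hx] at h
      obtain ⟨pre, suf, h1, h2, h3⟩ := ih h
      refine ⟨x :: pre, suf, by simp [h1], ?_, h3⟩
      intro y hy
      rcases List.mem_cons.mp hy with rfl | hmem
      · exact hx
      · exact h2 y hmem

lemma pairwise_gt_pyRange_neg_one (a b : Int) :
    (PySem.List.pyRange a b (-1)).Pairwise (· > ·) := by
  rw [PySem.List.pyRange_neg_one_eq_reverse, List.pairwise_reverse]
  exact PySem.List.pairwise_lt_pyRange_one _ _

-- ---- flattening facts ----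

lemma flat_len_rect (rows : List (List Int)) (L : Nat) (h : ∀ r ∈ rows, r.length = L) :
    (rows.flatMap id).length = rows.length * L := by
  induction rows with
  | nil => simp
  | cons r rs ih =>
    simp only [List.flatMap_cons, List.length_append, List.length_cons, id]
    rw [h r List.mem_cons_self, ih (fun r' hr' => h r' (List.mem_cons_of_mem _ hr'))]
    ring

-- a last-occurrence decomposition of a list is unique
lemma last_occ_unique (c : Int) (u1 t1 u2 t2 : List Int)
    (h : u1 ++ c :: t1 = u2 ++ c :: t2) (h1 : c ∉ t1) (h2 : c ∉ t2) :
    u1.length = u2.length := by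
  rcases Nat.lt_trichotomy u1.length u2.length with hlt | heq | hgt
  · exfalso
    apply h1
    have hg : (u1 ++ c :: t1)[u2.length]? = some c := by
      rw [h, List.getElem?_append_right (Nat.le_refl _)]
      simp
    rw [List.getElem?_append_right (le_of_lt hlt),
      show u2.length - u1.length = (u2.length - u1.length - 1) + 1 by omega,
      List.getElem?_cons_succ] at hg
    exact List.mem_of_getElem? hg
  · exact heq
  · exfalso
    apply h2
    have hg : (u2 ++ c :: t2)[u1.length]? = some c := by
      rw [← h, List.getElem?_append_right (Nat.le_refl _)]
      simp
    rw [List.getElem?_append_right (le_of_lt hgt),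
      show u1.length - u2.length = (u1.length - u2.length - 1) + 1 by omega,
      List.getElem?_cons_succ] at hg
    exact List.mem_of_getElem? hg

-- the reverse scan equals B's flatten / reverse-index / divmod position
lemma posB_eq (color : Int) (board : List (List Int))
    (hrect : ∀ row ∈ board, row.length = (PySem.List.pyGetD board 0 []).length)
    (hL : 1 ≤ (PySem.List.pyGetD board 0 []).length) :
    (bFindPos color board ((PySem.List.pyGetD board 0 []).length : Int)
        (PySem.List.pyRange ((board.length : Int) - 1) (-1) (-1))).getD (-1, -1)
    = (if (board.flatMap id).contains color then
        (PySem.Int.floordiv (((board.flatMap id).length : Int) - 1 -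
            (((PySem.List.index? (board.flatMap id).reverse color).getD 0 : Nat) : Int))
          ((PySem.List.pyGetD board 0 []).length : Int),
         PySem.Int.mod (((board.flatMap id).length : Int) - 1 -
            (((PySem.List.index? (board.flatMap id).reverse color).getD 0 : Nat) : Int))
          ((PySem.List.pyGetD board 0 []).length : Int))
       else (-1, -1)) := by
  set L : Nat := (PySem.List.pyGetD board 0 []).length with hLdef
  have hcellmem : ∀ (i j : Int), 0 ≤ i → i < (board.length : Int) → 0 ≤ j → j < (L : Int) →
      PySem.List.pyGetD (PySem.List.pyGetD board i []) j 0 ∈ board.flatMap id := by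
    intro i j hi0 hi1 hj0 hj1
    rw [PySem.List.pyGetD_eq_getElem board [] hi0 hi1]
    have hrl : board[i.toNat].length = L := hrect _ (List.getElem_mem _)
    rw [PySem.List.pyGetD_eq_getElem _ 0 hj0 (by rw [hrl]; exact hj1)]
    exact List.mem_flatMap.mpr ⟨board[i.toNat], List.getElem_mem _, List.getElem_mem _⟩
  by_cases hc : color ∈ board.flatMap id
  · -- colour present: both sides return the last row-major occurrence
    have hcont : (board.flatMap id).contains color = true := by simpa using hc
    rw [hcont, if_pos rfl]
    have hrev : color ∈ (board.flatMap id).reverse := by simpa using hc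
    obtain ⟨m, hm⟩ := Option.isSome_iff_exists.mp ((PySem.List.index?_isSome_iff _ _).mpr hrev)
    obtain ⟨pre, suf, hdec, hmlen, hnp⟩ := (PySem.List.index?_eq_some_iff _ _ _).mp hm
    have hflatB : board.flatMap id = suf.reverse ++ color :: pre.reverse := by
      have h := congrArg List.reverse hdec
      rw [List.reverse_reverse] at h
      rw [h]
      simp
    have hnt2 : color ∉ pre.reverse := by simpa using hnp
    cases ho : bFindPos color board (L : Int)
        (PySem.List.pyRange ((board.length : Int) - 1) (-1) (-1)) with
    | none =>
      exfalso
      obtain ⟨row, hrowm, hcol⟩ := List.mem_flatMap.mp hc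
      simp only [id_eq] at hcol
      obtain ⟨i0, hi0, rfl⟩ := List.mem_iff_getElem.mp hrowm
      obtain ⟨j0, hj0, rfl⟩ := List.mem_iff_getElem.mp hcol
      have hrownone := bFindPos_none _ _ _ _ (i0 : Int) ho
        (by rw [PySem.List.mem_pyRange_neg_one]; omega)
      have hrowe : PySem.List.pyGetD board (i0 : Int) [] = board[i0] := by
        rw [PySem.List.pyGetD_natCast, List.getD_eq_getElem _ _ hi0]
      rw [hrowe] at hrownone
      have hlen : board[i0].length = L := hrect _ (List.getElem_mem hi0)
      have := bFindRow_none _ _ _ (j0 : Int) hrownone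
        (by rw [PySem.List.mem_pyRange_neg_one]; omega)
      apply this
      rw [PySem.List.pyGetD_natCast, List.getD_eq_getElem _ _ hj0]
    | some pr =>
      obtain ⟨i, j⟩ := pr
      obtain ⟨preR, sufR, hRdec, hRnone, hRhit⟩ := bFindPos_some_strong _ _ _ _ _ _ ho
      obtain ⟨preC, sufC, hCdec, hCno, hChit⟩ := bFindRow_some_strong _ _ _ _ hRhit
      have hiB : 0 ≤ i ∧ i < (board.length : Int) := by
        have hmem : i ∈ PySem.List.pyRange ((board.length : Int) - 1) (-1) (-1) := by
          rw [hRdec]; exact List.mem_append.mpr (Or.inr List.mem_cons_self)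
        rw [PySem.List.mem_pyRange_neg_one] at hmem; omega
      have hjB : 0 ≤ j ∧ j < (L : Int) := by
        have hmem : j ∈ PySem.List.pyRange ((L : Int) - 1) (-1) (-1) := by
          rw [hCdec]; exact List.mem_append.mpr (Or.inr List.mem_cons_self)
        rw [PySem.List.mem_pyRange_neg_one] at hmem; omega
      have houter : ∀ i' : Int, i < i' → i' < (board.length : Int) →
          bFindRow color (PySem.List.pyGetD board i' [])
            (PySem.List.pyRange ((L : Int) - 1) (-1) (-1)) = none := by
        intro i' hgt hlt
        have hmem : i' ∈ PySem.List.pyRange ((board.length : Int) - 1) (-1) (-1) := by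
          rw [PySem.List.mem_pyRange_neg_one]; omega
        rw [hRdec] at hmem
        have hpw := pairwise_gt_pyRange_neg_one ((board.length : Int) - 1) (-1)
        rw [hRdec] at hpw
        rcases List.mem_append.mp hmem with hpre | hrest
        · exact hRnone _ hpre
        · rcases List.mem_cons.mp hrest with rfl | hsuf
          · omega
          · have := List.rel_of_pairwise_cons (List.pairwise_append.mp hpw).2.1 hsuf
            omega
      have hinner : ∀ j' : Int, j < j' → j' < (L : Int) →
          PySem.List.pyGetD (PySem.List.pyGetD board i []) j' 0 ≠ color := by
        intro j' hgt hlt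
        have hmem : j' ∈ PySem.List.pyRange ((L : Int) - 1) (-1) (-1) := by
          rw [PySem.List.mem_pyRange_neg_one]; omega
        rw [hCdec] at hmem
        have hpw := pairwise_gt_pyRange_neg_one ((L : Int) - 1) (-1)
        rw [hCdec] at hpw
        rcases List.mem_append.mp hmem with hpre | hrest
        · exact hCno _ hpre
        · rcases List.mem_cons.mp hrest with rfl | hsuf
          · omega
          · have := List.rel_of_pairwise_cons (List.pairwise_append.mp hpw).2.1 hsuf
            omega
      have hiN : i = ((i.toNat : Nat) : Int) := (Int.toNat_of_nonneg hiB.1).symm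
      have hjN : j = ((j.toNat : Nat) : Int) := (Int.toNat_of_nonneg hjB.1).symm
      have hiNlt : i.toNat < board.length := by omega
      have hrowi : PySem.List.pyGetD board i [] = board[i.toNat] :=
        PySem.List.pyGetD_eq_getElem board [] hiB.1 hiB.2
      have hrowiL : board[i.toNat].length = L := hrect _ (List.getElem_mem hiNlt)
      have hjNlt : j.toNat < board[i.toNat].length := by rw [hrowiL]; omega
      have hcellij : board[i.toNat][j.toNat] = color := by
        have h := hChit
        rw [hrowi, PySem.List.pyGetD_eq_getElem _ 0 hjB.1 (by rw [hrowiL]; exact hjB.2)] at h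
        exact h
      have hflatA : board.flatMap id =
          ((board.take i.toNat).flatMap id ++ board[i.toNat].take j.toNat) ++
            color :: (board[i.toNat].drop (j.toNat + 1) ++ (board.drop (i.toNat + 1)).flatMap id) := by
        conv_lhs => rw [← List.take_append_drop i.toNat board, ← List.getElem_cons_drop hiNlt]
        rw [List.flatMap_append, List.flatMap_cons]
        simp only [id_eq]
        conv_lhs =>
          rw [show (board[i.toNat] : List Int) =
              board[i.toNat].take j.toNat ++ color :: board[i.toNat].drop (j.toNat + 1) from by
            conv_lhs => rw [← List.take_append_drop j.toNat board[i.toNat],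
              ← List.getElem_cons_drop hjNlt, hcellij]]
        simp [List.append_assoc]
      have hnt1 : color ∉ (board[i.toNat].drop (j.toNat + 1) ++ (board.drop (i.toNat + 1)).flatMap id) := by
        intro hmem
        rcases List.mem_append.mp hmem with h1 | h2
        · obtain ⟨d, hd, hdx⟩ := List.mem_iff_getElem.mp h1
          rw [List.getElem_drop] at hdx
          have hidx : j.toNat + 1 + d < board[i.toNat].length := by
            rw [List.length_drop] at hd; omega
          refine hinner ((j.toNat + 1 + d : Nat) : Int) (by omega) (by rw [← hrowiL]; exact_mod_cast hidx) ?_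
          rw [hrowi, PySem.List.pyGetD_natCast, List.getD_eq_getElem _ _ hidx]
          exact hdx
        · obtain ⟨row', hrow', hx⟩ := List.mem_flatMap.mp h2
          simp only [id_eq] at hx
          obtain ⟨d, hd, hrd⟩ := List.mem_iff_getElem.mp hrow'
          rw [List.getElem_drop] at hrd
          have hi' : i.toNat + 1 + d < board.length := by
            rw [List.length_drop] at hd; omega
          have hnone' := houter ((i.toNat + 1 + d : Nat) : Int) (by omega) (by exact_mod_cast hi')
          have hrowlen : row'.length = L := by
            rw [← hrd]; exact hrect _ (List.getElem_mem hi')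
          obtain ⟨e, he, hex⟩ := List.mem_iff_getElem.mp hx
          have := bFindRow_none _ _ _ ((e : Nat) : Int) hnone'
            (by rw [PySem.List.mem_pyRange_neg_one]
                constructor
                · omega
                · rw [hrowlen] at he; omega)
          apply this
          rw [show PySem.List.pyGetD board ((i.toNat + 1 + d : Nat) : Int) [] = row' from by
              rw [PySem.List.pyGetD_natCast, List.getD_eq_getElem _ _ hi']; exact hrd,
            PySem.List.pyGetD_natCast, List.getD_eq_getElem _ _ he]
          exact hex
      have hUlen : ((board.take i.toNat).flatMap id ++ board[i.toNat].take j.toNat).length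
          = i.toNat * L + j.toNat := by
        rw [List.length_append,
          flat_len_rect _ L (fun r hr => hrect r (List.mem_of_mem_take hr)),
          List.length_take, List.length_take]
        rw [Nat.min_eq_left (le_of_lt hiNlt), Nat.min_eq_left (le_of_lt hjNlt)]
      have hkey := last_occ_unique color _ _ _ _ (hflatA.symm.trans hflatB) hnt1 hnt2
      rw [hUlen, List.length_reverse] at hkey
      have hflen : (board.flatMap id).length = suf.length + 1 + pre.length := by
        rw [hflatB]; simp; omega
      have hkval : ((board.flatMap id).length : Int) - 1 - ((m : Nat) : Int)
          = ((i.toNat * L + j.toNat : Nat) : Int) := by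
        rw [hflen, ← hmlen]
        push_cast
        omega
      rw [hm]
      simp only [Option.getD_some]
      rw [hkval, PySem.Int.floordiv_natCast, PySem.Int.mod_natCast]
      have hdiv : (i.toNat * L + j.toNat) / L = i.toNat := by
        rw [show i.toNat * L + j.toNat = L * i.toNat + j.toNat from by ring,
          Nat.mul_add_div (by omega), Nat.div_eq_of_lt (by omega)]
        omega
      have hmod : (i.toNat * L + j.toNat) % L = j.toNat := by
        rw [show i.toNat * L + j.toNat = L * i.toNat + j.toNat from by ring,
          Nat.mul_add_mod, Nat.mod_eq_of_lt (by omega)]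
      rw [hdiv, hmod, ← hiN, ← hjN]
  · -- colour absent: the scan finds nothing and B keeps (-1, -1)
    have hcont : (board.flatMap id).contains color = false := by simpa using hc
    have hnone : bFindPos color board (L : Int)
        (PySem.List.pyRange ((board.length : Int) - 1) (-1) (-1)) = none := by
      rw [bFindPos_eq_findSome?, List.findSome?_eq_none_iff]
      intro i hi
      rw [Option.map_eq_none_iff, bFindRow_eq_find?, List.find?_eq_none]
      intro j hj
      rw [PySem.List.mem_pyRange_neg_one] at hi hj
      simp only [beq_iff_eq]
      intro hcol
      exact hc (hcol ▸ hcellmem i j (by omega) (by omega) (by omega) (by omega))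
    rw [hnone, hcont]
    simp

-- ---- helpers for the neighbour part ----

lemma pyGetD_mod {α : Type} (xs : List α) (k : Int) (d : α)
    (h1 : -(xs.length : Int) ≤ k) (h2 : k < (xs.length : Int)) :
    PySem.List.pyGetD xs k d = PySem.List.pyGetD xs (PySem.Int.mod k (xs.length : Int)) d := by
  have hlen : 0 < (xs.length : Int) := by omega
  rw [PySem.Int.mod_eq_emod_of_pos hlen]
  by_cases hk : 0 ≤ k
  · rw [Int.emod_eq_of_lt hk h2]
  · have he : k % (xs.length : Int) = k + xs.length := by
      rw [← Int.add_emod_right]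
      exact Int.emod_eq_of_lt (by omega) (by omega)
    rw [he, show k + (xs.length : Int) = ((xs.length - (-k).toNat : Nat) : Int) by omega,
       PySem.List.pyGetD_natCast, List.getD_eq_getElem _ _ (by omega)]
    conv_lhs => rw [show k = -(((-k).toNat : Nat) : Int) by omega]
    rw [PySem.List.pyGetD_neg_natCast xs (-k).toNat d (by omega) (by omega)]

lemma mod_bounds (r b : Int) (hb : 0 < b) : 0 ≤ PySem.Int.mod r b ∧ PySem.Int.mod r b < b := by
  rw [PySem.Int.mod_eq_emod_of_pos hb]
  exact ⟨Int.emod_nonneg r (by omega), Int.emod_lt_of_pos r hb⟩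

lemma mod_self_of_bounds (r b : Int) (h0 : 0 ≤ r) (h1 : r < b) : PySem.Int.mod r b = r := by
  rw [PySem.Int.mod_eq_emod_of_pos (by omega)]
  exact Int.emod_eq_of_lt h0 h1

lemma mod_add_self (r b : Int) (hb : 0 < b) : PySem.Int.mod (r + b) b = PySem.Int.mod r b := by
  rw [PySem.Int.mod_eq_emod_of_pos hb, PySem.Int.mod_eq_emod_of_pos hb, Int.add_emod_right]

lemma pass_order (v : Int) (s : Bool) :
    (v == 0 || v == 3 || v == 2 || (s && decide (4 ≤ v) && decide (v ≤ 7))) =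
    (v == 0 || v == 2 || v == 3 || (s && decide (4 ≤ v) && decide (v ≤ 7))) := by
  cases h2 : v == 2 <;> cases h3 : v == 3 <;> simp

-- A's passability test at raw indices equals B's at wrapped indices
lemma cond_eq (board : List (List Int)) (strong : Bool) (r c : Int)
    (hrect : ∀ row ∈ board, row.length = (PySem.List.pyGetD board 0 []).length)
    (hr1 : -(board.length : Int) ≤ r) (hr2 : r < (board.length : Int))
    (hc1 : -((PySem.List.pyGetD board 0 []).length : Int) ≤ c)
    (hc2 : c < ((PySem.List.pyGetD board 0 []).length : Int)) :
    aPass board r c strong =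
      bPassable (bCell board (PySem.Int.mod r (board.length : Int))
        (PySem.Int.mod c ((PySem.List.pyGetD board 0 []).length : Int))) strong := by
  have hL1 : 0 < (board.length : Int) := by omega
  have hcell : aCell board r c =
      bCell board (PySem.Int.mod r (board.length : Int))
        (PySem.Int.mod c ((PySem.List.pyGetD board 0 []).length : Int)) := by
    unfold aCell bCell
    rw [pyGetD_mod board r [] hr1 hr2]
    have hmb := mod_bounds r (board.length : Int) hL1
    have hmem : PySem.List.pyGetD board (PySem.Int.mod r (board.length : Int)) [] ∈ board := by
      refine PySem.List.pyGetD_mem board [] ?_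
      unfold PySem.Raise.InRange
      omega
    have hrl : (PySem.List.pyGetD board (PySem.Int.mod r (board.length : Int)) []).length =
        (PySem.List.pyGetD board 0 []).length := hrect _ hmem
    rw [pyGetD_mod _ c 0 (by rw [hrl]; exact hc1) (by rw [hrl]; exact hc2), hrl]
  unfold aPass bPassable
  rw [hcell, pass_order]

-- the whole neighbour list: A's unrolled chain vs B's filtered move table
lemma nbr_eq (board : List (List Int)) (strong : Bool) (i j : Int)
    (hrect : ∀ row ∈ board, row.length = (PySem.List.pyGetD board 0 []).length)
    (hij : (0 ≤ i ∧ i < (board.length : Int) ∧ 0 ≤ j ∧ j < ((PySem.List.pyGetD board 0 []).length : Int)) ∨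
      (i = -1 ∧ j = -1 ∧ 2 ≤ (board.length : Int) ∧ 2 ≤ ((PySem.List.pyGetD board 0 []).length : Int))) :
    (let l1 : Int := (board.length : Int)
     let l2 : Int := ((PySem.List.pyGetD board 0 []).length : Int)
     let next0 : List (Int × Int) := []
     let next1 := if aPass board (i - 1) j strong then next0 ++ [(PySem.Int.mod (i - 1 + l1) l1, j)] else next0
     let ii := PySem.Int.mod (i + 1) l1
     let next2 := if aPass board ii j strong then next1 ++ [(ii, j)] else next1
     let next3 := if aPass board i (j - 1) strong then next2 ++ [(i, PySem.Int.mod (j - 1 + l2) l2)] else next2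
     let jj := PySem.Int.mod (j + 1) l2
     if aPass board i jj strong then next3 ++ [(i, jj)] else next3) =
    (let l1 : Int := (board.length : Int)
     let l2 : Int := ((PySem.List.pyGetD board 0 []).length : Int)
     (([((PySem.Int.mod (i - 1) l1, j), bCell board (PySem.Int.mod (i - 1) l1) (PySem.Int.mod j l2)),
        ((PySem.Int.mod (i + 1) l1, j), bCell board (PySem.Int.mod (i + 1) l1) (PySem.Int.mod j l2)),
        ((i, PySem.Int.mod (j - 1) l2), bCell board (PySem.Int.mod i l1) (PySem.Int.mod (j - 1) l2)),
        ((i, PySem.Int.mod (j + 1) l2), bCell board (PySem.Int.mod i l1) (PySem.Int.mod (j + 1) l2))] :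
        List ((Int × Int) × Int)).filter (fun pc => bPassable pc.2 strong)).map Prod.fst) := by
  have hb1 : 0 < (board.length : Int) := by rcases hij with h | h <;> omega
  have hb2 : 0 < ((PySem.List.pyGetD board 0 []).length : Int) := by rcases hij with h | h <;> omega
  have hA1 : aPass board (i - 1) j strong =
      bPassable (bCell board (PySem.Int.mod (i - 1) (board.length : Int))
        (PySem.Int.mod j ((PySem.List.pyGetD board 0 []).length : Int))) strong :=
    cond_eq board strong (i - 1) j hrect (by rcases hij with h | h <;> omega)
      (by rcases hij with h | h <;> omega) (by rcases hij with h | h <;> omega)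
      (by rcases hij with h | h <;> omega)
  have hm2 := mod_bounds (i + 1) (board.length : Int) hb1
  have hA2 : aPass board (PySem.Int.mod (i + 1) (board.length : Int)) j strong =
      bPassable (bCell board (PySem.Int.mod (i + 1) (board.length : Int))
        (PySem.Int.mod j ((PySem.List.pyGetD board 0 []).length : Int))) strong := by
    have h := cond_eq board strong (PySem.Int.mod (i + 1) (board.length : Int)) j hrect
      (by omega) (by omega) (by rcases hij with h | h <;> omega) (by rcases hij with h | h <;> omega)
    rwa [mod_self_of_bounds _ _ hm2.1 hm2.2] at h
  have hA3 : aPass board i (j - 1) strong =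
      bPassable (bCell board (PySem.Int.mod i (board.length : Int))
        (PySem.Int.mod (j - 1) ((PySem.List.pyGetD board 0 []).length : Int))) strong :=
    cond_eq board strong i (j - 1) hrect (by rcases hij with h | h <;> omega)
      (by rcases hij with h | h <;> omega) (by rcases hij with h | h <;> omega)
      (by rcases hij with h | h <;> omega)
  have hm4 := mod_bounds (j + 1) ((PySem.List.pyGetD board 0 []).length : Int) hb2
  have hA4 : aPass board i (PySem.Int.mod (j + 1) ((PySem.List.pyGetD board 0 []).length : Int)) strong =
      bPassable (bCell board (PySem.Int.mod i (board.length : Int))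
        (PySem.Int.mod (j + 1) ((PySem.List.pyGetD board 0 []).length : Int))) strong := by
    have h := cond_eq board strong i (PySem.Int.mod (j + 1) ((PySem.List.pyGetD board 0 []).length : Int))
      hrect (by rcases hij with h | h <;> omega) (by rcases hij with h | h <;> omega)
      (by omega) (by omega)
    rwa [mod_self_of_bounds _ _ hm4.1 hm4.2] at h
  have hp1 : PySem.Int.mod (i - 1 + (board.length : Int)) (board.length : Int) =
      PySem.Int.mod (i - 1) (board.length : Int) := mod_add_self _ _ hb1
  have hp3 : PySem.Int.mod (j - 1 + ((PySem.List.pyGetD board 0 []).length : Int))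
        ((PySem.List.pyGetD board 0 []).length : Int) =
      PySem.Int.mod (j - 1) ((PySem.List.pyGetD board 0 []).length : Int) := mod_add_self _ _ hb2
  dsimp only
  rw [hA1, hA2, hA3, hA4, hp1, hp3]
  simp only [List.filter_cons, List.filter_nil]
  generalize bPassable (bCell board (PySem.Int.mod (i - 1) (board.length : Int))
      (PySem.Int.mod j ((PySem.List.pyGetD board 0 []).length : Int))) strong = b1
  generalize bPassable (bCell board (PySem.Int.mod (i + 1) (board.length : Int))
      (PySem.Int.mod j ((PySem.List.pyGetD board 0 []).length : Int))) strong = b2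
  generalize bPassable (bCell board (PySem.Int.mod i (board.length : Int))
      (PySem.Int.mod (j - 1) ((PySem.List.pyGetD board 0 []).length : Int))) strong = b3
  generalize bPassable (bCell board (PySem.Int.mod i (board.length : Int))
      (PySem.Int.mod (j + 1) ((PySem.List.pyGetD board 0 []).length : Int))) strong = b4
  cases b1 <;> cases b2 <;> cases b3 <;> cases b4 <;> simp

-- ===== VERDICT (by name: the statement is the Claim_ definition above) =====
theorem check_whether_can_run_spec : Claim_equal_check_whether_can_run := by
  intro color board strong hdom hpre
  obtain ⟨hb, hrect, hl2, hprop⟩ := hpre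
  have hij : ∀ i j : Int,
      (bFindPos color board ((PySem.List.pyGetD board 0 []).length : Int)
        (PySem.List.pyRange ((board.length : Int) - 1) (-1) (-1))).getD (-1, -1) = (i, j) →
      ((0 ≤ i ∧ i < (board.length : Int) ∧ 0 ≤ j ∧
          j < ((PySem.List.pyGetD board 0 []).length : Int)) ∨
        (i = -1 ∧ j = -1 ∧ 2 ≤ (board.length : Int) ∧
          2 ≤ ((PySem.List.pyGetD board 0 []).length : Int))) := by
    intro i j hp
    cases ho : bFindPos color board ((PySem.List.pyGetD board 0 []).length : Int)
        (PySem.List.pyRange ((board.length : Int) - 1) (-1) (-1)) with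
    | some pr =>
      rw [ho] at hp
      simp at hp
      obtain ⟨hmem, hrow⟩ := bFindPos_some _ _ _ _ i j (by rw [ho, hp])
      obtain ⟨hjmem, _⟩ := bFindRow_some _ _ _ _ hrow
      rw [PySem.List.mem_pyRange_neg_one] at hmem hjmem
      left
      omega
    | none =>
      rw [ho] at hp
      simp at hp
      obtain ⟨rfl, rfl⟩ := hp.symm
      rcases hprop with ⟨row, hrowm, hcol⟩ | hbig
      · exfalso
        obtain ⟨i0, hi0, rfl⟩ := List.mem_iff_getElem.mp hrowm
        obtain ⟨j0, hj0, rfl⟩ := List.mem_iff_getElem.mp hcol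
        have hrownone := bFindPos_none _ _ _ _ (i0 : Int) ho
          (by rw [PySem.List.mem_pyRange_neg_one]; omega)
        have hrowe : PySem.List.pyGetD board (i0 : Int) [] = board[i0] := by
          rw [PySem.List.pyGetD_natCast, List.getD_eq_getElem _ _ hi0]
        rw [hrowe] at hrownone
        have hlen : board[i0].length = (PySem.List.pyGetD board 0 []).length :=
          hrect _ (List.getElem_mem hi0)
        have := bFindRow_none _ _ _ (j0 : Int) hrownone
          (by rw [PySem.List.mem_pyRange_neg_one]; omega)
        apply this
        rw [PySem.List.pyGetD_natCast, List.getD_eq_getElem _ _ hj0]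
      · right
        exact ⟨rfl, rfl, by omega, by omega⟩
  unfold Spec_check_whether_can_run check_whether_can_run check_whether_can_run_alt
  dsimp only
  rw [pos_eq, ← posB_eq color board hrect hl2]
  refine Prod.ext rfl ?_
  exact nbr_eq board strong _ _ hrect (hij _ _ rfl)
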